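-- pv_equiv track=rewrite | github.com/Vapora293/one-shot-siamese | ts_loader.py | get_original_indices
-- ===== SOURCE A (Python) =====
-- def get_original_indices(arr, flat_indices):
--     original_indices = []
--     current_index = 0
--     for sub_array in arr:
--         if current_index in flat_indices:
--             original_indices.append(current_index)
--         current_index += 1
--     return original_indices
-- ===== SOURCE B (Python) =====
-- def get_original_indices(arr, flat_indices):
--     return sorted(set(range(len(arr))) & set(flat_indices))
-- ===== Notes on version B (the rewrite author's own statement) =====
-- stated objective: faster
-- what changed: Replaces the counter loop with a per-index list-membership scan by a one-line set intersection of range(len(arr)) with set(flat_indices), sorted to restore ascending order.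
import Mathlib
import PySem

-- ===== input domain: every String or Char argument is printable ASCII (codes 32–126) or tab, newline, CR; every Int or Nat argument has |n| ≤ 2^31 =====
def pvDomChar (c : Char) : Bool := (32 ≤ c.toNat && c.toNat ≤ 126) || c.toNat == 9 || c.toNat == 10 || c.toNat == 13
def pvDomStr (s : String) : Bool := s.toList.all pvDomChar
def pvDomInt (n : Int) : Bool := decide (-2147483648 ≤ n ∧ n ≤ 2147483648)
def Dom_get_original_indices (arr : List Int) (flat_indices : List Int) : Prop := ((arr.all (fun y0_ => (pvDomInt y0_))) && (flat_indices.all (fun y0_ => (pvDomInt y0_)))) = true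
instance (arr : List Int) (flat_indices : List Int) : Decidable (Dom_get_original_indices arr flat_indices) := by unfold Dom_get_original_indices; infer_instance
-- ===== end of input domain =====

-- B replaces A's counter loop (membership test per index, append) by intersecting
-- set(range(len(arr))) with set(flat_indices) and sorting the result: simpler one-liner.

-- ===== PORT A =====
def get_original_indices (arr : List Int) (flat_indices : List Int) : List Int :=
  (arr.foldl (fun (st : List Int × Int) _ =>
      (if st.2 ∈ flat_indices then st.1 ++ [st.2] else st.1, st.2 + 1)) ([], 0)).1

-- ===== PORT B =====
def get_original_indices_alt (arr : List Int) (flat_indices : List Int) : List Int :=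
  PySem.List.sorted
    (PySem.Set.inter (PySem.Set.ofList (PySem.List.pyRange 0 (arr.length : Int) 1))
                     (PySem.Set.ofList flat_indices))
    (fun x => x) false

-- ===== PRECONDITION & SPEC =====
def Spec_get_original_indices (arr : List Int) (flat_indices : List Int) (out : List Int) : Prop := out = get_original_indices_alt arr flat_indices
instance (arr : List Int) (flat_indices : List Int) (out : List Int) : Decidable (Spec_get_original_indices arr flat_indices out) := by unfold Spec_get_original_indices; infer_instance

-- ===== CLAIM (what is proved, stated in full; the proofs are below) =====
def Claim_equal_get_original_indices : Prop := ∀ (arr : List Int) (flat_indices : List Int), Dom_get_original_indices arr flat_indices → Spec_get_original_indices arr flat_indices (get_original_indices arr flat_indices)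

-- ===== LEMMAS AND PROOFS =====

-- A's loop over arr, started at counter c with accumulator acc, appends exactly the
-- members of flat_indices among c, c+1, …, c+len(arr)-1, in order.
theorem get_original_indices_loop (flat_indices : List Int) :
    ∀ (arr : List Int) (acc : List Int) (c : Int),
      (arr.foldl (fun (st : List Int × Int) _ =>
          (if st.2 ∈ flat_indices then st.1 ++ [st.2] else st.1, st.2 + 1)) (acc, c)).1
      = acc ++ (PySem.List.pyRange c (c + arr.length) 1).filter
          (fun i => decide (i ∈ flat_indices)) := by
  intro arr
  induction arr with
  | nil =>
      intro acc c
      simp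
  | cons x xs ih =>
      intro acc c
      have hlt : c < c + ((x :: xs).length : Int) := by
        simp only [List.length_cons]; push_cast; omega
      rw [List.foldl_cons, PySem.List.pyRange_one_cons hlt]
      have harith : c + ((x :: xs).length : Int) = (c + 1) + (xs.length : Int) := by
        simp only [List.length_cons]; push_cast; ring
      rw [harith]
      simp only [List.filter_cons]
      by_cases h : c ∈ flat_indices
      · simp only [h, if_pos, decide_true, ih]
        simp
      · simp only [h, if_neg, decide_false, ih, not_false_iff]
        simp

-- B's sorted intersection is exactly that ascending filtered range.
theorem get_original_indices_eq_filter (arr flat_indices : List Int) :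
    get_original_indices_alt arr flat_indices
      = (PySem.List.pyRange 0 (arr.length : Int) 1).filter
          (fun i => decide (i ∈ flat_indices)) := by
  unfold get_original_indices_alt
  set R := PySem.List.pyRange 0 (arr.length : Int) 1 with hR
  set F := R.filter (fun i => decide (i ∈ flat_indices)) with hF
  set I := PySem.Set.inter (PySem.Set.ofList R) (PySem.Set.ofList flat_indices) with hI
  have hRnodup : R.Nodup := PySem.List.nodup_pyRange_one _ _
  have hFnodup : F.Nodup := hRnodup.filter _
  have hInodup : I.Nodup := PySem.Set.nodup_inter _ _ (PySem.Set.nodup_ofList R)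
  have hmem : ∀ y : Int, y ∈ F ↔ y ∈ I := by
    intro y
    simp [hF, hI, PySem.Set.mem_inter, PySem.Set.mem_ofList, and_comm]
  have hperm : F.Perm I := (List.perm_ext_iff_of_nodup hFnodup hInodup).mpr hmem
  have hpair : F.Pairwise (fun a b : Int => (fun x => x) a < (fun x => x) b) := by
    exact List.Pairwise.sublist List.filter_sublist (PySem.List.pairwise_lt_pyRange_one 0 (arr.length : Int))
  exact PySem.List.sorted_eq_of_perm_of_pairwise_lt I F (fun x => x) hperm hpair

-- ===== VERDICT (by name: the statement is the Claim_ definition above) =====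
theorem get_original_indices_spec : Claim_equal_get_original_indices := by
  intro arr flat_indices _
  unfold Spec_get_original_indices get_original_indices
  rw [get_original_indices_loop flat_indices arr [] 0,
      get_original_indices_eq_filter]
  simp
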